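-- pv_equiv track=rewrite | github.com/Pinky2207/Project | BasicPythonCodesForPractice/exercise_3.py | count_letters_spaces_digits
-- ===== SOURCE A (Python) =====
-- def count_letters_spaces_digits(e):
-- # Assigning the initial values as 0
--   letter = 0
--   space = 0
--   digit = 0
--
--   # Iterating through each character in the given input
--   for char in e:
--
--     # If the character is letter
--     if char.isalpha():
--       letter = letter + 1
--
--     # if the input character contains space
--     elif char.isspace():
--       space = space + 1
--
--     # if the input character is digits
--     elif char.isdigit():
--       digit = digit + 1
--
-- # Summarizing the total number of letters, spaces and digits
--   counts = {'No of letters': letter, 'No of spaces': space, 'No of digits': digit}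
--   return counts
-- ===== SOURCE B (Python) =====
-- def count_letters_spaces_digits(e):
--     letter = sum(1 for c in e if c.isalpha())
--     space = sum(1 for c in e if c.isspace())
--     digit = sum(1 for c in e if c.isdigit())
--     return {'No of letters': letter, 'No of spaces': space, 'No of digits': digit}
-- ===== Notes on version B (the rewrite author's own statement) =====
-- stated objective: idiomatic
-- what changed: Replaces A's single fused loop with mutable counters and if/elif branches by three independent generator-expression passes, one per character class (safe because the classes are mutually exclusive).
import Mathlib
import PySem

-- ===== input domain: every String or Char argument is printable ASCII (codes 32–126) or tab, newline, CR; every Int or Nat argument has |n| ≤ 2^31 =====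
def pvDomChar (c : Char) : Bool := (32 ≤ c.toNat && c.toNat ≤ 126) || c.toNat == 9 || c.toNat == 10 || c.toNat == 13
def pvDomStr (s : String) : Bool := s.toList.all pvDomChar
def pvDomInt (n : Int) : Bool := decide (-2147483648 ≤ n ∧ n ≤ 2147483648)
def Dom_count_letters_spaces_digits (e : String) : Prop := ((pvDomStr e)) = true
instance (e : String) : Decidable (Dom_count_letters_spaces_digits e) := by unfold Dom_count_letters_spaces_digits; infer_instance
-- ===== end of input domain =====

-- B replaces A's single fused if/elif loop by three independent per-class counting passes (idiomatic; same O(n) cost).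


-- ===== PORT A =====
-- one fused loop over the characters, three mutable counters, if/elif/elif
def count_letters_spaces_digits (e : String) : List (String × Int) :=
  let acc := e.toList.foldl (fun (acc : Int × Int × Int) char =>
    let (letter, space, digit) := acc
    if PySem.Chars.isalpha char then (letter + 1, space, digit)
    else if PySem.Chars.isspace char then (letter, space + 1, digit)
    else if PySem.Chars.isdigit char then (letter, space, digit + 1)
    else (letter, space, digit)) (0, 0, 0)
  [("No of letters", acc.1), ("No of spaces", acc.2.1), ("No of digits", acc.2.2)]

-- ===== PORT B =====
-- three independent counting passes, one per character class
def count_letters_spaces_digits_alt (e : String) : List (String × Int) :=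
  [("No of letters", (e.toList.countP PySem.Chars.isalpha : Int)),
   ("No of spaces", (e.toList.countP PySem.Chars.isspace : Int)),
   ("No of digits", (e.toList.countP PySem.Chars.isdigit : Int))]

-- ===== PRECONDITION & SPEC =====
def Spec_count_letters_spaces_digits (e : String) (out : List (String × Int)) : Prop := out = count_letters_spaces_digits_alt e
instance (e : String) (out : List (String × Int)) : Decidable (Spec_count_letters_spaces_digits e out) := by unfold Spec_count_letters_spaces_digits; infer_instance

-- ===== CLAIM (what is proved, stated in full; the proofs are below) =====
def Claim_equal_count_letters_spaces_digits : Prop := ∀ (e : String), Dom_count_letters_spaces_digits e → Spec_count_letters_spaces_digits e (count_letters_spaces_digits e)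

-- ===== LEMMAS AND PROOFS =====
theorem pvCharLe (a b : Char) : (a ≤ b) ↔ (a.toNat ≤ b.toNat) := Iff.rfl

-- the three Python character classes are mutually exclusive (true for every Char under PySem's definitions)
theorem pvAlphaNotSpace (c : Char) (h : PySem.Chars.isalpha c = true) : PySem.Chars.isspace c = false := by
  simp [PySem.Chars.isalpha, PySem.Chars.isupper, PySem.Chars.islower, PySem.Chars.isspace, pvCharLe] at *
  omega

theorem pvAlphaNotDigit (c : Char) (h : PySem.Chars.isalpha c = true) : PySem.Chars.isdigit c = false := by
  simp [PySem.Chars.isalpha, PySem.Chars.isupper, PySem.Chars.islower, PySem.Chars.isdigit, pvCharLe] at *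
  omega

theorem pvSpaceNotDigit (c : Char) (h : PySem.Chars.isspace c = true) : PySem.Chars.isdigit c = false := by
  simp [PySem.Chars.isspace, PySem.Chars.isdigit, pvCharLe] at *
  omega

-- A's fused fold computes the three independent class counts, for any starting accumulator
theorem pvFoldEqCounts (l : List Char) (a b c : Int) :
    l.foldl (fun (acc : Int × Int × Int) char =>
      let (letter, space, digit) := acc
      if PySem.Chars.isalpha char then (letter + 1, space, digit)
      else if PySem.Chars.isspace char then (letter, space + 1, digit)
      else if PySem.Chars.isdigit char then (letter, space, digit + 1)
      else (letter, space, digit)) (a, b, c)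
    = (a + l.countP PySem.Chars.isalpha, b + l.countP PySem.Chars.isspace, c + l.countP PySem.Chars.isdigit) := by
  induction l generalizing a b c with
  | nil => simp
  | cons ch t ih =>
    by_cases hA : PySem.Chars.isalpha ch = true
    · simp [List.foldl, hA, ih, pvAlphaNotSpace ch hA, pvAlphaNotDigit ch hA]
      omega
    · by_cases hS : PySem.Chars.isspace ch = true
      · simp [List.foldl, hA, hS, ih, pvSpaceNotDigit ch hS]
        omega
      · by_cases hD : PySem.Chars.isdigit ch = true
        · simp [List.foldl, hA, hS, hD, ih]
          omega
        · simp [List.foldl, hA, hS, hD, ih]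

-- ===== VERDICT (by name: the statement is the Claim_ definition above) =====
theorem count_letters_spaces_digits_spec : Claim_equal_count_letters_spaces_digits := by
  intro e _
  unfold Spec_count_letters_spaces_digits count_letters_spaces_digits count_letters_spaces_digits_alt
  simp [pvFoldEqCounts]
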